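-- pv_equiv track=rewrite | github.com/siraj-samsudeen/quran-srs | app/common_function.py | group_by_type
-- ===== SOURCE A (Python) =====
-- from collections import defaultdict
--
-- def group_by_type(data, current_type, feild=None, preserve_order=False):
--     columns_map = {
--         "juz": "juz_number",
--         "surah": "surah_id",
--         "page": "page_number",
--         "item_id": "item_id",
--         "id": "id",
--     }
--     grouped = defaultdict(
--         list
--     )  # defaultdict() is creating the key as the each column_map number and value as the list of records
--     for row in data:
--         grouped[row[columns_map[current_type]]].append(
--             row if feild is None else row[feild]
--         )
--     # preserve_order=True keeps SQL ORDER BY; False sorts by key (page number)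
--     if preserve_order:
--         return dict(grouped)
--     sorted_grouped = dict(sorted(grouped.items(), key=lambda x: int(x[0])))
--     return sorted_grouped
-- ===== SOURCE B (Python) =====
-- def group_by_type(data, current_type, feild=None, preserve_order=False):
--     # B: project (key, value) pairs once, dedup keys in first-appearance order
--     # (sorted unless preserve_order), then build each group by a per-key filter.
--     # feild=None (groups of whole rows) is handled identically to A.
--     columns_map = {
--         "juz": "juz_number",
--         "surah": "surah_id",
--         "page": "page_number",
--         "item_id": "item_id",
--         "id": "id",
--     }
--     pairs = [(row[columns_map[current_type]], row if feild is None else row[feild])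
--              for row in data]
--     keys = list(dict.fromkeys(k for k, _ in pairs))
--     if not preserve_order:
--         keys.sort()
--     return {k: [v for kk, v in pairs if kk == k] for k in keys}
-- ===== Notes on version B (the rewrite author's own statement) =====
-- stated objective: alternative
-- what changed: A accumulates a defaultdict in one pass and then sorts its items; B materialises the (key, value) pairs, deduplicates the keys in first-appearance order (sorting them unless preserve_order), and builds each group by a per-key filter over the pairs.
-- outside the precondition, e.g. on group_by_type([{'page_number': 1}], 'week', 'page_number', False): A raises KeyError, B raises KeyError
import Mathlib
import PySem

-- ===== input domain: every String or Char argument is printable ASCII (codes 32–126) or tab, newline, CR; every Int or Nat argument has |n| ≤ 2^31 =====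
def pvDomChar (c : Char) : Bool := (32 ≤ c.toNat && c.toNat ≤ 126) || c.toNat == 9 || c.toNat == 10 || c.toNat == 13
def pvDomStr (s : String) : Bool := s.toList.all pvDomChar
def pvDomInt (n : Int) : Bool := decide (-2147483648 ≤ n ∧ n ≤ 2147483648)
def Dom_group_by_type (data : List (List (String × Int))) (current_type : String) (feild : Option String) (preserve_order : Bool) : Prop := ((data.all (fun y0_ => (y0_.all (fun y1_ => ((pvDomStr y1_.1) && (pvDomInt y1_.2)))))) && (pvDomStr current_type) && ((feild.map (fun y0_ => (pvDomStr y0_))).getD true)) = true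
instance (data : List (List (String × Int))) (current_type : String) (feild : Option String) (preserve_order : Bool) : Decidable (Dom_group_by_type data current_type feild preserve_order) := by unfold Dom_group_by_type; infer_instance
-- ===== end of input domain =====

-- B replaces A's one-pass defaultdict + item sort by: project (key, value) pairs, dedup the
-- keys (sorted unless preserve_order), and build each group by a per-key filter (objective:
-- alternative — same results, a different decomposition, not claimed faster).

-- the columns_map dict literal shared by both Pythons
def pvColsMap : PySem.Dict String String :=
  PySem.Dict.mk [("juz", "juz_number"), ("surah", "surah_id"), ("page", "page_number"),
                 ("item_id", "item_id"), ("id", "id")]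

-- row[k] for a Python dict row (first-match lookup); default 0 is unreachable under Pre_
def pvRowVal (row : List (String × Int)) (k : String) : Int :=
  ((PySem.Dict.mk row).get? k).getD 0

-- ===== PORT A =====
-- 'row if feild is None else row[feild]': with feild = None the Python value is the whole row
-- (a dict), so the function's result is not of this file's return type; Pre_ excludes that case
-- on nonempty data, and the port writes the unreachable placeholder 0 there.
def group_by_type (data : List (List (String × Int))) (current_type : String) (feild : Option String) (preserve_order : Bool) : List (Int × List Int) :=
  let col : String := (pvColsMap.get? current_type).getD ""   -- KeyError when none: excluded by Pre_
  let grouped : PySem.Dict Int (List Int) :=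
    data.foldl (fun g row =>
      g.modify (pvRowVal row col) []
        (fun l => l ++ [match feild with | none => 0 | some f => pvRowVal row f]))
      PySem.Dict.empty
  if preserve_order then grouped.items
  else PySem.List.sorted grouped.items (fun x => x.1)   -- key int(x[0]) = x[0] on an int key

-- ===== PORT B =====
def group_by_type_alt (data : List (List (String × Int))) (current_type : String) (feild : Option String) (preserve_order : Bool) : List (Int × List Int) :=
  let pairs : List (Int × Int) :=   -- per-row columns_map lookup, as in Source B (KeyError: excluded by Pre_)
    data.map (fun row => (pvRowVal row ((pvColsMap.get? current_type).getD ""),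
                          match feild with | none => 0 | some f => pvRowVal row f))
  let keys0 : List Int := PySem.List.dedup (pairs.map (fun p => p.1))
  let keys : List Int := if preserve_order then keys0 else PySem.List.sorted keys0 (fun k => k)
  keys.map (fun k => (k, (pairs.filter (fun p => p.1 == k)).map (fun p => p.2)))

-- ===== PRECONDITION & SPEC =====
-- On nonempty data, Pre_ excludes (a) the KeyError inputs — current_type not a columns_map key,
-- or some row missing the mapped column or the feild key — on which A raises, and (b)
-- feild = None, on which A returns groups of WHOLE ROWS (a dict[int, list[dict]]): the Python
-- values of A and B agree there (B handles feild=None identically — see the cite), but that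
-- value lies outside the return type List (Int × List Int) this task fixes for the ports, so no
-- faithful port can state the equality in Lean; it is excluded as 'not a value of the declared
-- type', not because the behaviours differ. With data = [] no lookup runs and A returns {}, so
-- empty data is admitted for every feild and current_type.
def Pre_group_by_type (data : List (List (String × Int))) (current_type : String) (feild : Option String) (preserve_order : Bool) : Prop :=
  data = [] ∨
  ((pvColsMap.get? current_type).isSome = true ∧
   feild.isSome = true ∧
   ∀ row ∈ data,
     ((PySem.Dict.mk row).get? ((pvColsMap.get? current_type).getD "")).isSome = true ∧
     ((PySem.Dict.mk row).get? (feild.getD "")).isSome = true)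
instance (data : List (List (String × Int))) (current_type : String) (feild : Option String) (preserve_order : Bool) : Decidable (Pre_group_by_type data current_type feild preserve_order) := by unfold Pre_group_by_type; infer_instance

def pvWitness_group_by_type : (List (List (String × Int))) × String × Option String × Bool :=
  ([[("page_number", 2), ("id", 7)], [("page_number", 1), ("id", 8)]], "page", some "id", false)

def Spec_group_by_type (data : List (List (String × Int))) (current_type : String) (feild : Option String) (preserve_order : Bool) (out : List (Int × List Int)) : Prop := out = group_by_type_alt data current_type feild preserve_order
instance (data : List (List (String × Int))) (current_type : String) (feild : Option String) (preserve_order : Bool) (out : List (Int × List Int)) : Decidable (Spec_group_by_type data current_type feild preserve_order out) := by unfold Spec_group_by_type; infer_instance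

-- ===== CLAIM (what is proved, stated in full; the proofs are below) =====
def Claim_equal_group_by_type : Prop := ∀ (data : List (List (String × Int))) (current_type : String) (feild : Option String) (preserve_order : Bool), Dom_group_by_type data current_type feild preserve_order → Pre_group_by_type data current_type feild preserve_order → Spec_group_by_type data current_type feild preserve_order (group_by_type data current_type feild preserve_order)

-- ===== LEMMAS AND PROOFS =====

-- A's grouped dict, as a function of the projected (key, value) pairs
theorem pv_items_char (pairs : List (Int × Int)) :
    (pairs.foldl (fun d p => d.modify p.1 [] (fun l => l ++ [p.2])) (PySem.Dict.empty : PySem.Dict Int (List Int))).items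
    = (PySem.Set.ofList (pairs.map (fun p => p.1))).map
        (fun k => (k, (pairs.filter (fun p => p.1 == k)).map (fun p => p.2))) := by
  have hnd : (pairs.foldl (fun d p => d.modify p.1 [] (fun l => l ++ [p.2]))
      (PySem.Dict.empty : PySem.Dict Int (List Int))).keys.Nodup := by
    exact PySem.Dict.nodup_keys_foldl_modify_key pairs (fun p => p.1) []
      (fun _ p l => l ++ [p.2]) PySem.Dict.empty (by simp [PySem.Dict.empty])
  rw [PySem.Dict.items_eq_map_keys _ hnd []]
  have hk : (pairs.foldl (fun d p => d.modify p.1 [] (fun l => l ++ [p.2]))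
      (PySem.Dict.empty : PySem.Dict Int (List Int))).keys
      = PySem.Set.ofList (pairs.map (fun p => p.1)) := by
    rw [PySem.Dict.keys_foldl_modify_key pairs (fun p => p.1) [] (fun _ p l => l ++ [p.2])]
    simp [PySem.Dict.empty, PySem.Set.update, PySem.Set.ofList]
  rw [hk]
  refine List.map_congr_left (fun k _ => ?_)
  rw [PySem.Dict.getD_foldl_modify_append pairs PySem.Dict.empty k]
  rfl

-- sorting distinct-key items by key = mapping over the sorted key list
theorem pv_sorted_items (ks : List Int) (g : Int → List Int) :
    PySem.List.sorted ((PySem.Set.ofList ks).map (fun k => (k, g k))) (fun x => x.1)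
    = (PySem.List.sorted (PySem.Set.ofList ks) (fun k => k)).map (fun k => (k, g k)) := by
  apply PySem.List.sorted_eq_of_perm_of_pairwise_lt
  · exact (PySem.List.sorted_perm (PySem.Set.ofList ks) (fun k => k) false).map _
  · exact List.Pairwise.map _ (fun a b h => h) (PySem.List.sorted_ofList_pairwise_lt ks)

theorem pv_main (data : List (List (String × Int))) (col : String)
    (proj : List (String × Int) → Int) (po : Bool) :
    (let grouped : PySem.Dict Int (List Int) :=
        data.foldl (fun g row => g.modify (pvRowVal row col) [] (fun l => l ++ [proj row]))
          PySem.Dict.empty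
     if po then grouped.items else PySem.List.sorted grouped.items (fun x => x.1))
    = (let pairs : List (Int × Int) := data.map (fun row => (pvRowVal row col, proj row))
       let keys0 : List Int := PySem.List.dedup (pairs.map (fun p => p.1))
       let keys : List Int := if po then keys0 else PySem.List.sorted keys0 (fun k => k)
       keys.map (fun k => (k, (pairs.filter (fun p => p.1 == k)).map (fun p => p.2)))) := by
  simp only
  rw [show data.foldl (fun g row => g.modify (pvRowVal row col) [] (fun l => l ++ [proj row]))
        (PySem.Dict.empty : PySem.Dict Int (List Int))
      = (data.map (fun row => (pvRowVal row col, proj row))).foldl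
          (fun d p => d.modify p.1 [] (fun l => l ++ [p.2])) PySem.Dict.empty
      from (List.foldl_map (f := fun row => (pvRowVal row col, proj row))
        (g := fun d p => d.modify p.1 [] (fun l => l ++ [p.2])) (l := data)
        (init := PySem.Dict.empty)).symm]
  rw [pv_items_char, PySem.List.dedup_eq_ofList]
  cases po with
  | true => simp
  | false => simp only [Bool.false_eq_true, if_false, pv_sorted_items]

-- ===== VERDICT (by name: the statement is the Claim_ definition above) =====
theorem group_by_type_spec : Claim_equal_group_by_type := by
  intro data current_type feild preserve_order _ _
  show group_by_type data current_type feild preserve_order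
      = group_by_type_alt data current_type feild preserve_order
  cases feild with
  | none =>
      exact pv_main data ((pvColsMap.get? current_type).getD "") (fun _ => 0) preserve_order
  | some f =>
      exact pv_main data ((pvColsMap.get? current_type).getD "")
        (fun row => pvRowVal row f) preserve_order
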